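-- pv_equiv track=rewrite | github.com/Ghostlock-AI/agent-hacking | examples/web-agent/client/client.py | _max_backtick_run
-- ===== SOURCE A (Python) =====
-- def _max_backtick_run(s: str) -> int:
--     max_run = run = 0
--     for ch in s:
--         if ch == "`":
--             run += 1
--             if run > max_run:
--                 max_run = run
--         else:
--             run = 0
--     return max_run
-- ===== SOURCE B (Python) =====
-- def _max_backtick_run(s: str) -> int:
--     # Two-phase: tokenize maximal backtick runs, then reduce with max.
--     runs = []
--     i, n = 0, len(s)
--     while i < n:
--         if s[i] == "`":
--             j = i
--             while j < n and s[j] == "`":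
--                 j += 1
--             runs.append(j - i)
--             i = j
--         else:
--             i += 1
--     return max(runs, default=0)
-- ===== Notes on version B (the rewrite author's own statement) =====
-- stated objective: alternative
-- what changed: Replaces the single-pass running-counter/max state machine by a two-phase tokenize-then-reduce: first collect the lengths of all maximal backtick runs by skipping over each run, then take max(runs, default=0).
import Mathlib
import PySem

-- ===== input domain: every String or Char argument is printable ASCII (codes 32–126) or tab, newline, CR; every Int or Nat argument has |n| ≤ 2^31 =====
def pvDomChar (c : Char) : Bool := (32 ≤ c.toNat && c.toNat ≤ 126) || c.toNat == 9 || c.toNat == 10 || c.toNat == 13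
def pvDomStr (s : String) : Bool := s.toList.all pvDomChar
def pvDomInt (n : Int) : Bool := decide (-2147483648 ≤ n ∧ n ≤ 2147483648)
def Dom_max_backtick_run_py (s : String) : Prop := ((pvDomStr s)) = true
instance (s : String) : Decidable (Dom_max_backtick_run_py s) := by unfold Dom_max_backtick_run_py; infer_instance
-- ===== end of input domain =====

-- B replaces A's running-counter state machine by a two-phase tokenize-then-reduce (collect maximal run lengths, then max with default 0); same O(n) cost, alternative structure.

-- ===== PORT A =====
def pvStepA : Int × Int → Char → Int × Int
  | (m, r), c => if c = '`' then ((if r + 1 > m then r + 1 else m), r + 1) else (m, 0)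

def max_backtick_run_py (s : String) : Int := (s.toList.foldl pvStepA (0, 0)).1

-- ===== PORT B =====
-- inner while loop of Source B: length of the leading backtick run, and the remainder after it
def pvTakeRun : List Char → Int × List Char
  | [] => (0, [])
  | c :: cs => if c = '`' then let p := pvTakeRun cs; (p.1 + 1, p.2) else (0, c :: cs)

theorem pvTakeRun_len_le : ∀ (l : List Char), (pvTakeRun l).2.length ≤ l.length := by
  intro l
  induction l with
  | nil => simp [pvTakeRun]
  | cons c cs ih => by_cases h : c = '`' <;> simp [pvTakeRun, h] <;> omega

-- outer while loop of Source B: the list of maximal backtick-run lengths, left to right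
def pvRuns : List Char → List Int
  | [] => []
  | c :: cs =>
      if c = '`' then ((pvTakeRun cs).1 + 1) :: pvRuns (pvTakeRun cs).2
      else pvRuns cs
termination_by l => l.length
decreasing_by
  · have := pvTakeRun_len_le cs; simp; omega
  · simp

-- max(runs, default=0)
def max_backtick_run_py_alt (s : String) : Int := PySem.List.maxD (pvRuns s.toList) id 0

-- ===== PRECONDITION & SPEC =====
def Spec_max_backtick_run_py (s : String) (out : Int) : Prop := out = max_backtick_run_py_alt s
instance (s : String) (out : Int) : Decidable (Spec_max_backtick_run_py s out) := by unfold Spec_max_backtick_run_py; infer_instance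

-- ===== CLAIM (what is proved, stated in full; the proofs are below) =====
def Claim_equal_max_backtick_run_py : Prop := ∀ (s : String), Dom_max_backtick_run_py s → Spec_max_backtick_run_py s (max_backtick_run_py s)

-- ===== LEMMAS AND PROOFS =====
theorem pvRuns_nil : pvRuns [] = [] := by rw [pvRuns]

theorem pvRuns_cons (c : Char) (cs : List Char) :
    pvRuns (c :: cs) =
      if c = '`' then ((pvTakeRun cs).1 + 1) :: pvRuns (pvTakeRun cs).2 else pvRuns cs := by
  rw [pvRuns]

-- pvBest l r = the final max_run of A started with current run r and running max 0
def pvBest : List Char → Int → Int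
  | [], r => r
  | c :: cs, r => if c = '`' then pvBest cs (r + 1) else max r (pvBest cs 0)

theorem le_pvBest : ∀ (l : List Char) (r : Int), r ≤ pvBest l r := by
  intro l
  induction l with
  | nil => intro r; simp [pvBest]
  | cons c cs ih =>
      intro r
      by_cases h : c = '`'
      · have := ih (r + 1)
        simp only [pvBest, if_pos h]
        omega
      · simp only [pvBest, if_neg h]
        exact le_max_left _ _

theorem foldA_eq : ∀ (l : List Char) (m r : Int), 0 ≤ r → r ≤ m →
    (l.foldl pvStepA (m, r)).1 = max m (pvBest l r) := by
  intro l
  induction l with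
  | nil =>
      intro m r h0 h
      simp only [List.foldl_nil, pvBest, max_def]
      split <;> omega
  | cons c cs ih =>
      intro m r h0 h
      rw [List.foldl_cons]
      by_cases hc : c = '`'
      · have h1 : r + 1 ≤ (if r + 1 > m then r + 1 else m) := by split <;> omega
        rw [show pvStepA (m, r) c = ((if r + 1 > m then r + 1 else m), r + 1) by
          simp [pvStepA, hc]]
        rw [ih _ (r + 1) (by omega) h1]
        rw [show pvBest (c :: cs) r = pvBest cs (r + 1) by simp [pvBest, hc]]
        have hb := le_pvBest cs (r + 1)
        simp only [max_def]
        split_ifs <;> omega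
      · rw [show pvStepA (m, r) c = (m, 0) by simp [pvStepA, hc]]
        rw [ih m 0 le_rfl (by omega)]
        rw [show pvBest (c :: cs) r = max r (pvBest cs 0) by simp [pvBest, hc]]
        simp only [max_def]
        split_ifs <;> omega

theorem pvTakeRun_fst_nonneg : ∀ (l : List Char), 0 ≤ (pvTakeRun l).1 := by
  intro l
  induction l with
  | nil => simp [pvTakeRun]
  | cons c cs ih => by_cases h : c = '`' <;> simp [pvTakeRun, h]; omega

theorem pvBest_span : ∀ (l : List Char) (r : Int), 0 ≤ r →
    pvBest l r = max (r + (pvTakeRun l).1) (pvBest (pvTakeRun l).2 0) := by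
  intro l
  induction l with
  | nil =>
      intro r h
      simp only [pvBest, pvTakeRun, max_def]
      split <;> omega
  | cons c cs ih =>
      intro r h
      by_cases hc : c = '`'
      · rw [show pvBest (c :: cs) r = pvBest cs (r + 1) by simp [pvBest, hc]]
        rw [ih (r + 1) (by omega)]
        rw [show pvTakeRun (c :: cs) = ((pvTakeRun cs).1 + 1, (pvTakeRun cs).2) by
          simp [pvTakeRun, hc]]
        ring_nf
      · have h0 : (0:Int) ≤ pvBest cs 0 := le_pvBest cs 0
        rw [show pvBest (c :: cs) r = max r (pvBest cs 0) by simp [pvBest, hc]]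
        rw [show pvTakeRun (c :: cs) = (0, c :: cs) by simp [pvTakeRun, hc]]
        rw [show pvBest (c :: cs) 0 = max 0 (pvBest cs 0) by simp [pvBest, hc]]
        simp only [max_def]
        split_ifs <;> omega

theorem foldl_max_shift : ∀ (xs : List Int) (a b : Int),
    xs.foldl max (max a b) = max a (xs.foldl max b) := by
  intro xs
  induction xs with
  | nil => intro a b; simp
  | cons x t ih => intro a b; simp only [List.foldl_cons, max_assoc, ih]

theorem pvBest_runs : ∀ (n : Nat) (l : List Char), l.length ≤ n →
    pvBest l 0 = (pvRuns l).foldl max 0 := by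
  intro n
  induction n with
  | zero =>
      intro l hl
      have : l = [] := List.eq_nil_of_length_eq_zero (by omega)
      simp [this, pvBest, pvRuns_nil]
  | succ n ih =>
      intro l hl
      match l with
      | [] => simp [pvBest, pvRuns_nil]
      | c :: cs =>
          by_cases hc : c = '`'
          · have hlen := pvTakeRun_len_le cs
            have hrest := ih (pvTakeRun cs).2 (by simp at hl; omega)
            have hspan := pvBest_span cs 1 (by omega)
            rw [show pvBest (c :: cs) 0 = pvBest cs 1 by simp [pvBest, hc]]
            rw [hspan, hrest, pvRuns_cons, if_pos hc, List.foldl_cons]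
            rw [show max (0:Int) ((pvTakeRun cs).1 + 1) = max ((pvTakeRun cs).1 + 1) 0 from
              max_comm _ _]
            rw [foldl_max_shift]
            ring_nf
          · have hcs := ih cs (by simp at hl; omega)
            have h0 : (0:Int) ≤ pvBest cs 0 := le_pvBest cs 0
            rw [show pvBest (c :: cs) 0 = max 0 (pvBest cs 0) by simp [pvBest, hc]]
            rw [pvRuns_cons, if_neg hc, ← hcs]
            simp only [max_def]
            split_ifs <;> omega

theorem max?_cons_cons (m x : Int) (t : List Int) :
    PySem.List.max? (m :: x :: t) id = PySem.List.max? ((if m < x then x else m) :: t) id := by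
  simp only [PySem.List.max?, List.foldl_cons]
  split <;> rename_i h <;> simp only [id_eq] at h <;> simp [h]

theorem max?_eq : ∀ (t : List Int) (m : Int), PySem.List.max? (m :: t) id = some (t.foldl max m) := by
  intro t
  induction t with
  | nil => intro m; rfl
  | cons x t ih =>
      intro m
      rw [max?_cons_cons, ih, List.foldl_cons]
      congr 2
      simp [max_def]
      split_ifs <;> omega

theorem pvRuns_pos : ∀ (n : Nat) (l : List Char) (x : Int), l.length ≤ n → x ∈ pvRuns l → 1 ≤ x := by
  intro n
  induction n with
  | zero =>
      intro l x hl hx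
      have : l = [] := List.eq_nil_of_length_eq_zero (by omega)
      rw [this, pvRuns_nil] at hx
      simp at hx
  | succ n ih =>
      intro l x hl hx
      match l with
      | [] => rw [pvRuns_nil] at hx; simp at hx
      | c :: cs =>
          by_cases hc : c = '`'
          · rw [pvRuns_cons, if_pos hc] at hx
            rcases List.mem_cons.mp hx with h | h
            · have := pvTakeRun_fst_nonneg cs; omega
            · have hlen := pvTakeRun_len_le cs
              exact ih (pvTakeRun cs).2 x (by simp at hl; omega) h
          · rw [pvRuns_cons, if_neg hc] at hx
            exact ih cs x (by simp at hl; omega) hx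

theorem maxD_runs (l : List Char) : PySem.List.maxD (pvRuns l) id 0 = (pvRuns l).foldl max 0 := by
  match h : pvRuns l with
  | [] => simp [PySem.List.maxD, PySem.List.max?]
  | x :: t =>
      have hx : 1 ≤ x := pvRuns_pos l.length l x le_rfl (by rw [h]; exact List.mem_cons_self ..)
      simp only [PySem.List.maxD]
      rw [max?_eq, Option.getD_some, List.foldl_cons, show max (0:Int) x = x by omega]

-- ===== VERDICT (by name: the statement is the Claim_ definition above) =====
theorem max_backtick_run_py_spec : Claim_equal_max_backtick_run_py := by
  intro s _
  show max_backtick_run_py s = max_backtick_run_py_alt s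
  unfold max_backtick_run_py max_backtick_run_py_alt
  rw [foldA_eq s.toList 0 0 le_rfl le_rfl, maxD_runs, ← pvBest_runs s.toList.length s.toList le_rfl]
  have := le_pvBest s.toList 0
  simp only [max_def]
  split_ifs <;> omega
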